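-- pv_equiv track=rewrite | github.com/wow-kim/Algorithm | Programmers/2단계_더_맵게.py | solution
-- ===== SOURCE A (Python) =====
-- import heapq
--
-- def solution(scoville, K):
--     heapq.heapify(scoville)
--     answer = 0
--
--     while True:
--
--         f1 = heapq.heappop(scoville)
--         if f1 >= K: return answer
--         elif len(scoville) == 0: return -1
--         f2 = heapq.heappop(scoville)
--         heapq.heappush(scoville, f1 + f2*2)
--
--         answer += 1
-- ===== SOURCE B (Python) =====
-- def _insert_sorted(a, x):
--     i = 0
--     while i < len(a) and a[i] <= x:
--         i += 1
--     a.insert(i, x)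
--
--
-- def solution(scoville, K):
--     # NOTE: like A, mutates its argument (sorts/pops it); equivalence is about the return value.
--     scoville.sort()
--     answer = 0
--     while True:
--         f1 = scoville.pop(0)
--         if f1 >= K:
--             return answer
--         if not scoville:
--             return -1
--         f2 = scoville.pop(0)
--         _insert_sorted(scoville, f1 + 2 * f2)
--         answer += 1
-- ===== Notes on version B (the rewrite author's own statement) =====
-- stated objective: alternative
-- what changed: Replaces the binary heap (heapify + sift-based heappop/heappush) by a once-sorted list that is consumed from the front, with each combined value re-inserted at its ordered position by a scan; what is maintained (a totally ordered list vs a heap) and how the minimum is obtained (head vs root-after-sift) both change.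
import Mathlib
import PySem

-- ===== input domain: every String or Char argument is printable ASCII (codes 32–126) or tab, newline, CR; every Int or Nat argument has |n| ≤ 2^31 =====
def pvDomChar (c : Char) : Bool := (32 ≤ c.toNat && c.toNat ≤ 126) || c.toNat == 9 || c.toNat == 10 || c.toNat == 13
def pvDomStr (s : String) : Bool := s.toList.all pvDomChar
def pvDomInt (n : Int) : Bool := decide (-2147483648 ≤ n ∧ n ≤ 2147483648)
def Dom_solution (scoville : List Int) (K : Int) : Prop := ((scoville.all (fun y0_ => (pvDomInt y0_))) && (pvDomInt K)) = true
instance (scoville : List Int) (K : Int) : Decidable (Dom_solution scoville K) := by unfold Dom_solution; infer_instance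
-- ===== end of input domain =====

-- B keeps a once-sorted list and inserts combined values in order instead of A's heap; return-value
-- equivalence only: both Pythons mutate the argument list (A leaves a heap, B a sorted remnant).

-- ===== PORT A =====
-- heapq is modelled by its value semantics on Int: heapify reorders in place (same multiset),
-- heappop returns and removes the minimum value (ties are equal Ints, so the returned value is
-- exact), heappush adds the value to the multiset.
def solutionGo (l : List Int) (K ans : Int) : Int :=
  let f1 := (PySem.List.min? l (fun x => x)).getD 0   -- heappop; empty l is excluded by Pre_
  let rest := l.erase f1
  if f1 ≥ K then ans
  else if rest.length = 0 then -1
  else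
    let f2 := (PySem.List.min? rest (fun x => x)).getD 0
    solutionGo ((f1 + f2 * 2) :: rest.erase f2) K (ans + 1)
termination_by l.length
decreasing_by
  rename_i _hK hne
  have hr : rest ≠ [] := by intro h; exact hne (by rw [h]; rfl)
  have hl : l ≠ [] := by intro h; apply hr; rw [show rest = l.erase f1 from rfl, h]; rfl
  obtain ⟨m, hm⟩ : ∃ m, PySem.List.min? l (fun x => x) = some m := by
    cases h : PySem.List.min? l (fun x => x) with
    | none => exact absurd ((PySem.List.min?_eq_none_iff _ _).1 h) hl
    | some m => exact ⟨m, rfl⟩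
  obtain ⟨m2, hm2⟩ : ∃ m2, PySem.List.min? rest (fun x => x) = some m2 := by
    cases h : PySem.List.min? rest (fun x => x) with
    | none => exact absurd ((PySem.List.min?_eq_none_iff _ _).1 h) hr
    | some m2 => exact ⟨m2, rfl⟩
  have hmem : f1 ∈ l := by
    rw [show f1 = (PySem.List.min? l (fun x => x)).getD 0 from rfl, hm, Option.getD_some]
    exact PySem.List.min?_mem hm
  have hmem2 : f2 ∈ rest := by
    rw [show f2 = (PySem.List.min? rest (fun x => x)).getD 0 from rfl, hm2, Option.getD_some]
    exact PySem.List.min?_mem hm2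
  have h1 : rest.length = l.length - 1 := by
    rw [show rest = l.erase f1 from rfl, List.length_erase_of_mem hmem]
  have h2 : (rest.erase f2).length = rest.length - 1 := List.length_erase_of_mem hmem2
  have hlpos : 0 < l.length := List.length_pos_iff.2 hl
  have hrpos : 0 < rest.length := List.length_pos_iff.2 hr
  show ((f1 + f2 * 2) :: rest.erase f2).length < l.length
  simp only [List.length_cons, h2, h1]
  omega

def solution (scoville : List Int) (K : Int) : Int :=
  solutionGo scoville K 0

-- ===== PORT B =====
-- linear scan to the first strictly greater element, then insert (Source B's _insert_sorted)
def insertSorted (a : List Int) (x : Int) : List Int :=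
  match a with
  | [] => [x]
  | y :: t => if y ≤ x then y :: insertSorted t x else x :: y :: t

theorem length_insertSorted (a : List Int) (x : Int) :
    (insertSorted a x).length = a.length + 1 := by
  induction a with
  | nil => rfl
  | cons y t ih => simp only [insertSorted]; split <;> simp [ih]

def solutionAltGo (s : List Int) (K ans : Int) : Int :=
  match s with
  | [] => -1   -- unreachable: Python's pop(0) raises IndexError here (excluded by Pre_)
  | f1 :: rest =>
    if f1 ≥ K then ans
    else
      match rest with
      | [] => -1
      | f2 :: rest2 => solutionAltGo (insertSorted rest2 (f1 + 2 * f2)) K (ans + 1)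
termination_by s.length
decreasing_by simp [length_insertSorted]

def solution_alt (scoville : List Int) (K : Int) : Int :=
  solutionAltGo (PySem.List.sorted scoville (fun x => x) false) K 0

-- ===== PRECONDITION & SPEC =====
-- Pre_ excludes only the empty list, on which both Pythons raise IndexError (heappop / pop(0)).
def Pre_solution (scoville : List Int) (_K : Int) : Prop := scoville ≠ []
instance (scoville : List Int) (K : Int) : Decidable (Pre_solution scoville K) := by unfold Pre_solution; infer_instance
def pvWitness_solution : List Int × Int := ([1, 2, 3, 9, 10, 12], 7)

def Spec_solution (scoville : List Int) (K : Int) (out : Int) : Prop := out = solution_alt scoville K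
instance (scoville : List Int) (K : Int) (out : Int) : Decidable (Spec_solution scoville K out) := by unfold Spec_solution; infer_instance

-- ===== CLAIM (what is proved, stated in full; the proofs are below) =====
def Claim_equal_solution : Prop := ∀ (scoville : List Int) (K : Int), Dom_solution scoville K → Pre_solution scoville K → Spec_solution scoville K (solution scoville K)

-- ===== LEMMAS AND PROOFS =====

theorem insertSorted_perm (a : List Int) (x : Int) : (insertSorted a x).Perm (x :: a) := by
  induction a with
  | nil => rfl
  | cons y t ih =>
    simp only [insertSorted]
    split
    · exact (ih.cons y).trans (List.Perm.swap x y t)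
    · rfl

theorem insertSorted_pairwise (a : List Int) (x : Int) (h : a.Pairwise (· ≤ ·)) :
    (insertSorted a x).Pairwise (· ≤ ·) := by
  induction a with
  | nil => simp [insertSorted]
  | cons y t ih =>
    rcases List.pairwise_cons.1 h with ⟨hy, ht⟩
    simp only [insertSorted]
    split
    · rename_i hyx
      refine List.pairwise_cons.2 ⟨?_, ih ht⟩
      intro z hz
      rcases List.mem_cons.1 ((insertSorted_perm t x).mem_iff.1 hz) with rfl | hz
      · exact hyx
      · exact hy z hz
    · rename_i hyx
      have hxy : x ≤ y := by omega
      refine List.pairwise_cons.2 ⟨?_, h⟩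
      intro z hz
      rcases List.mem_cons.1 hz with rfl | hz
      · exact hxy
      · exact hxy.trans (hy z hz)

theorem min?_eq_head (l s' : List Int) (m : Int) (hp : l.Perm (m :: s'))
    (hs : (m :: s').Pairwise (· ≤ ·)) :
    PySem.List.min? l (fun x => x) = some m := by
  have hl : l ≠ [] := by
    intro h; exact absurd (hp.length_eq) (by simp [h])
  obtain ⟨v, hv⟩ : ∃ v, PySem.List.min? l (fun x => x) = some v := by
    cases h : PySem.List.min? l (fun x => x) with
    | none => exact absurd ((PySem.List.min?_eq_none_iff _ _).1 h) hl
    | some v => exact ⟨v, rfl⟩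
  have hvm : v ∈ l := PySem.List.min?_mem hv
  have hmin : ∀ y ∈ l, v ≤ y := PySem.List.min?_isMin hv
  have hml : m ∈ l := hp.mem_iff.2 (List.mem_cons_self)
  have h1 : v ≤ m := hmin m hml
  have h2 : m ≤ v := by
    rcases List.mem_cons.1 (hp.mem_iff.1 hvm) with h | h
    · omega
    · exact (List.pairwise_cons.1 hs).1 v h
  have : v = m := le_antisymm h1 h2
  rw [hv, this]

theorem go_eq (n : Nat) : ∀ (l s : List Int) (K ans : Int), l.length ≤ n → l ≠ [] →
    l.Perm s → s.Pairwise (· ≤ ·) → solutionGo l K ans = solutionAltGo s K ans := by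
  induction n with
  | zero =>
    intro l s K ans hn hne _ _
    exact absurd (List.length_eq_zero_iff.1 (Nat.le_zero.1 hn)) hne
  | succ n ih =>
    intro l s K ans hn hne hp hs
    obtain ⟨m, s', rfl⟩ : ∃ m s', s = m :: s' := by
      cases s with
      | nil => exact absurd (List.Perm.eq_nil hp) hne
      | cons m s' => exact ⟨m, s', rfl⟩
    have hmin : PySem.List.min? l (fun x => x) = some m := min?_eq_head l s' m hp hs
    unfold solutionGo
    simp only [hmin, Option.getD_some]
    have hrest : (l.erase m).Perm s' := by
      have := hp.erase m
      simpa [List.erase_cons_head] using this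
    by_cases hK : m ≥ K
    · rw [solutionAltGo.eq_def]; simp [hK]
    · simp only [hK, if_false]
      rw [solutionAltGo.eq_def]
      simp only [ge_iff_le, hK, if_false]
      by_cases hs' : s' = []
      · subst hs'
        have : (l.erase m).length = 0 := by simp [hrest.length_eq]
        simp [this]
      · obtain ⟨m2, s'', rfl⟩ : ∃ m2 s'', s' = m2 :: s'' := by
          cases s' with
          | nil => exact absurd rfl hs'
          | cons m2 s'' => exact ⟨m2, s'', rfl⟩
        have hlen : (l.erase m).length ≠ 0 := by
          rw [hrest.length_eq]; simp
        simp only [hlen, if_false]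
        have hs2 : (m2 :: s'').Pairwise (· ≤ ·) := (List.pairwise_cons.1 hs).2
        have hmin2 : PySem.List.min? (l.erase m) (fun x => x) = some m2 :=
          min?_eq_head (l.erase m) s'' m2 hrest hs2
        simp only [hmin2, Option.getD_some]
        have hrest2 : ((l.erase m).erase m2).Perm s'' := by
          have := hrest.erase m2
          simpa [List.erase_cons_head] using this
        have hml : m ∈ l := hp.mem_iff.2 (List.mem_cons_self)
        have hm2l : m2 ∈ l.erase m := PySem.List.min?_mem hmin2
        have heq : m + m2 * 2 = m + 2 * m2 := by ring
        rw [heq]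
        apply ih
        · have h1 : (l.erase m).length = l.length - 1 := List.length_erase_of_mem hml
          have h2 : ((l.erase m).erase m2).length = (l.erase m).length - 1 :=
            List.length_erase_of_mem hm2l
          have hlpos : 0 < l.length := List.length_pos_iff.2 hne
          simp only [List.length_cons, h2, h1]
          omega
        · simp
        · exact (hrest2.cons _).trans (insertSorted_perm s'' (m + 2 * m2)).symm
        · exact insertSorted_pairwise s'' (m + 2 * m2) (List.pairwise_cons.1 hs2).2

-- ===== VERDICT (by name: the statement is the Claim_ definition above) =====
theorem solution_spec : Claim_equal_solution := by
  intro scoville K _ hpre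
  unfold Spec_solution solution solution_alt
  exact go_eq scoville.length scoville _ K 0 le_rfl hpre
    (PySem.List.sorted_perm scoville (fun x => x) false).symm
    (PySem.List.sorted_pairwise scoville (fun x => x))
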